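-- pv_equiv track=rewrite | github.com/blokkies48/Hyperion_bootcamp | Level_1/Task_22/my_function.py | hello
-- ===== SOURCE A (Python) =====
-- def hello(sen):
--     # Splitting sentence passed to a list
--     sen_list = sen.split()
--     # Setting return list to false
--     return_list = []
--     # Enumerating over list with words in the sentence
--     for i, word in enumerate(sen_list):
--         # Using index to find every second word
--         if (i + 1) % 2 == 0:
--             # If it is a even num appends hello to list
--             return_list.append("Hello")
--         else:
--             # Else it appends the word
--             return_list.append(word)
--     # Returning string of the list
--     return " ".join(return_list)
-- ===== SOURCE B (Python) =====
-- def hello(sen):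
--     words = sen.split()
--     words[1::2] = ["Hello"] * len(words[1::2])
--     return " ".join(words)
-- ===== Notes on version B (the rewrite author's own statement) =====
-- stated objective: idiomatic
-- what changed: Replaces the enumerate loop with a per-index parity branch by a single strided slice assignment words[1::2] = ['Hello']*len(words[1::2]) that addresses the odd positions directly.
import Mathlib
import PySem

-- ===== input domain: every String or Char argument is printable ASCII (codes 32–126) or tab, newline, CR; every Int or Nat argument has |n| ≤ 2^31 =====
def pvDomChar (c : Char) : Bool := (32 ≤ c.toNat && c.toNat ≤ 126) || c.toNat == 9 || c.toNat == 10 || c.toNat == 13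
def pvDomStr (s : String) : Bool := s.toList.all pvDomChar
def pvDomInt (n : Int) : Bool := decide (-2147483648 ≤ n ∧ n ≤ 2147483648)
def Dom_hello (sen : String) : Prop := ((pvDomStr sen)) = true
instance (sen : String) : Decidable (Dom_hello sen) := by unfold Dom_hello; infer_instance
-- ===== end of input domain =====

-- B replaces the odd-indexed words in one strided slice assignment instead of branching per word (objective: idiomatic).

-- ===== PORT A =====
def hello (sen : String) : String :=
  let sen_list := PySem.Str.split₀ sen
  let return_list := (PySem.List.enumerate sen_list 0).foldl
    (fun acc p =>
      if PySem.Int.mod (p.1 + 1) 2 = 0 then acc ++ ["Hello"] else acc ++ [p.2]) []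
  PySem.Str.join " " return_list

-- ===== PORT B =====
-- words[1::2] = ["Hello"] * len(words[1::2]) : the right side has exactly the slice's length,
-- so the slice assignment sets each index of range(1, len(words), 2) to "Hello" (ported element-wise, exact here).
def hello_alt (sen : String) : String :=
  let words := PySem.Str.split₀ sen
  let words' := (PySem.List.pyRange 1 (words.length : Int) 2).foldl
    (fun ws i => ws.set i.toNat "Hello") words
  PySem.Str.join " " words'

-- ===== PRECONDITION & SPEC =====
def Spec_hello (sen : String) (out : String) : Prop := out = hello_alt sen
instance (sen : String) (out : String) : Decidable (Spec_hello sen out) := by unfold Spec_hello; infer_instance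

-- ===== CLAIM (what is proved, stated in full; the proofs are below) =====
def Claim_equal_hello : Prop := ∀ (sen : String), Dom_hello sen → Spec_hello sen (hello sen)

-- ===== LEMMAS AND PROOFS =====

theorem length_foldl_set (is : List Int) (ws : List String) :
    (is.foldl (fun ws i => ws.set i.toNat "Hello") ws).length = ws.length := by
  induction is generalizing ws with
  | nil => rfl
  | cons i is ih => simpa [List.foldl_cons] using ih (ws.set i.toNat "Hello")

theorem getElem?_foldl_set (is : List Int) (h0 : ∀ i ∈ is, 0 ≤ i)
    (ws : List String) (j : Nat) (hj : j < ws.length) :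
    (is.foldl (fun ws i => ws.set i.toNat "Hello") ws)[j]?
      = some (if (j : Int) ∈ is then "Hello" else ws[j]) := by
  induction is generalizing ws with
  | nil => simp [List.getElem?_eq_getElem hj]
  | cons i is ih =>
    have hi : 0 ≤ i := h0 i (by simp)
    have hj' : j < (ws.set i.toNat "Hello").length := by simpa using hj
    rw [List.foldl_cons,
      ih (fun x hx => h0 x (by simp [hx])) (ws.set i.toNat "Hello") hj']
    by_cases hm : (j : Int) ∈ is
    · simp [hm]
    · have hiff : i.toNat = j ↔ (j : Int) = i := by omega
      simp [hm, List.getElem_set, hiff, eq_comm]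

theorem hello_lists_eq (sen : String) : hello sen = hello_alt sen := by
  have key : ∀ ws : List String,
      PySem.Str.join " " ((PySem.List.enumerate ws 0).foldl
        (fun acc p =>
          if PySem.Int.mod (p.1 + 1) 2 = 0 then acc ++ ["Hello"] else acc ++ [p.2]) [])
      = PySem.Str.join " " ((PySem.List.pyRange 1 (ws.length : Int) 2).foldl
          (fun ws i => ws.set i.toNat "Hello") ws) := by
    intro ws
    have hfun : (fun (acc : List String) (p : Int × String) =>
        if PySem.Int.mod (p.1 + 1) 2 = 0 then acc ++ ["Hello"] else acc ++ [p.2])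
        = fun acc p => acc ++ [if PySem.Int.mod (p.1 + 1) 2 = 0 then "Hello" else p.2] := by
      funext acc p; split_ifs <;> rfl
    rw [hfun, PySem.List.foldl_append_singleton_eq_map, List.nil_append]
    refine congrArg (PySem.Str.join " ") ?_
    refine List.ext_getElem ?_ ?_
    · simp [length_foldl_set, PySem.List.length_enumerate]
    · intro j h1 h2
      have hjw : j < ws.length := by
        simpa [PySem.List.length_enumerate] using h1
      have hB := getElem?_foldl_set (PySem.List.pyRange 1 (ws.length : Int) 2)
        (fun i hi => by
          rw [PySem.List.mem_pyRange_iff_of_pos (by norm_num)] at hi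
          omega) ws j hjw
      have hRHS : (List.foldl (fun ws i => ws.set i.toNat "Hello") ws
          (PySem.List.pyRange 1 (ws.length : Int) 2))[j]'h2
          = if (j : Int) ∈ PySem.List.pyRange 1 (ws.length : Int) 2 then "Hello" else ws[j] :=
        (List.getElem_eq_iff h2).mpr hB
      rw [List.getElem_map, PySem.List.getElem_enumerate, hRHS]
      have hcond : PySem.Int.mod ((0 : Int) + (j : Int) + 1) 2 = 0
          ↔ (j : Int) ∈ PySem.List.pyRange 1 (ws.length : Int) 2 := by
        rw [PySem.List.mem_pyRange_iff_of_pos (by norm_num),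
          PySem.Int.mod_eq_zero_iff_dvd]
        constructor
        · rintro ⟨k, hk⟩
          exact ⟨by omega, by exact_mod_cast hjw, ⟨k - 1, by omega⟩⟩
        · rintro ⟨ha, hb, k, hk⟩
          exact ⟨k + 1, by omega⟩
      split_ifs with hA hBm hBm
      · rfl
      · exact absurd (hcond.mp hA) hBm
      · exact absurd (hcond.mpr hBm) hA
      · rfl
  exact key (PySem.Str.split₀ sen)

-- ===== VERDICT (by name: the statement is the Claim_ definition above) =====
theorem hello_spec : Claim_equal_hello := by
  intro sen _
  unfold Spec_hello
  exact hello_lists_eq sen
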